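-- pv_equiv track=rewrite | github.com/devyejin/cote-solve | 백준/Bronze/2846. 오르막길/오르막길.py | largest_inclination_diff
-- ===== SOURCE A (Python) =====
-- def largest_inclination_diff(arr):
--     max_diff = 0
--     current_diff = 0
--
--     for i in range(1, len(arr)):
--         diff = arr[i] - arr[i-1]
--         if diff > 0:
--             current_diff += diff
--             max_diff = max(max_diff, current_diff)
--         else:
--             current_diff = 0
--
--     return max_diff
-- ===== SOURCE B (Python) =====
-- def largest_inclination_diff(arr):
--     # Two-phase: (1) segment the array into maximal strictly ascending runs,
--     # (2) the answer is the largest (last - first) over those runs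
--     # (positive consecutive diffs telescope to last - first within a run).
--     runs = []
--     cur = []
--     for x in arr:
--         if cur and x <= cur[-1]:
--             runs.append(cur)
--             cur = [x]
--         else:
--             cur.append(x)
--     if cur:
--         runs.append(cur)
--     best = 0
--     for run in runs:
--         best = max(best, run[-1] - run[0])
--     return best
-- ===== Notes on version B (the rewrite author's own statement) =====
-- stated objective: alternative
-- what changed: B is a two-phase algorithm: it first materializes the maximal strictly ascending runs as an explicit list of segments, then takes the maximum of (last - first) over the segments, instead of A's single pass accumulating a running sum of positive consecutive differences.
import Mathlib
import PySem

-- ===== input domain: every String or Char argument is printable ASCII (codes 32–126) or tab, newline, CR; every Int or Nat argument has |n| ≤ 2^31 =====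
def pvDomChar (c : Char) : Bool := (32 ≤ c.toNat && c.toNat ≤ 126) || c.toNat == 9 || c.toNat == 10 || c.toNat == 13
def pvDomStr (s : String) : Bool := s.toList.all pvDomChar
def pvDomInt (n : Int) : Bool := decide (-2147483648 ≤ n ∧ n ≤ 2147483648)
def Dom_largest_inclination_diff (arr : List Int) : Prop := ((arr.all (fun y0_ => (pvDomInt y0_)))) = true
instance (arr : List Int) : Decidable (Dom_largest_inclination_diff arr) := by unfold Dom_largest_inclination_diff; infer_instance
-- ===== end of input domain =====

-- B is a two-phase algorithm (segment into maximal ascending runs, then max of last-first),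
-- instead of A's single pass summing positive consecutive differences; same cost, different decomposition.

-- ===== PORT A =====
-- loop body of A: state = (max_diff, current_diff), i the index from range(1, len(arr))
def pvAStep (arr : List Int) (s : Int × Int) (i : Int) : Int × Int :=
  let diff := PySem.List.pyGetD arr i 0 - PySem.List.pyGetD arr (i - 1) 0
  if diff > 0 then (max s.1 (s.2 + diff), s.2 + diff) else (s.1, 0)

def largest_inclination_diff (arr : List Int) : Int :=
  ((PySem.List.pyRange 1 (arr.length : Int) 1).foldl (pvAStep arr) (0, 0)).1

-- ===== PORT B =====
-- phase 1 loop body: state = (runs, cur); 'cur and x <= cur[-1]' closes the run, else append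
def pvBStep (s : List (List Int) × List Int) (x : Int) : List (List Int) × List Int :=
  match s.2.getLast? with
  | none => (s.1, s.2 ++ [x])              -- cur is empty: falsy, so the else branch appends
  | some l => if x ≤ l then (s.1 ++ [s.2], [x]) else (s.1, s.2 ++ [x])

-- run[-1] - run[0]; every run built in phase 1 is nonempty, so the defaults are never used
def pvRunVal (r : List Int) : Int := r.getLastD 0 - r.headD 0

def largest_inclination_diff_alt (arr : List Int) : Int :=
  let s := arr.foldl pvBStep ([], [])
  let runs := if s.2 ≠ [] then s.1 ++ [s.2] else s.1
  runs.foldl (fun best run => max best (pvRunVal run)) 0    -- phase 2: max of last-first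

-- ===== PRECONDITION & SPEC =====
def Spec_largest_inclination_diff (arr : List Int) (out : Int) : Prop := out = largest_inclination_diff_alt arr
instance (arr : List Int) (out : Int) : Decidable (Spec_largest_inclination_diff arr out) := by unfold Spec_largest_inclination_diff; infer_instance

-- ===== CLAIM (what is proved, stated in full; the proofs are below) =====
def Claim_equal_largest_inclination_diff : Prop := ∀ (arr : List Int), Dom_largest_inclination_diff arr → Spec_largest_inclination_diff arr (largest_inclination_diff arr)

-- ===== LEMMAS AND PROOFS =====

-- Common reference: recursion on consecutive pairs with A's state (max_diff, current_diff).
def pvPairs (s : Int × Int) (prev : Int) : List Int → Int × Int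
  | [] => s
  | x :: t =>
      pvPairs (if x - prev > 0 then (max s.1 (s.2 + (x - prev)), s.2 + (x - prev)) else (s.1, 0)) x t

theorem pvFoldA_eq (arr : List Int) : ∀ (k i : Nat) (s : Int × Int), arr.length = i + 1 + k →
    (PySem.List.pyRange ((i : Int) + 1) (arr.length : Int) 1).foldl (pvAStep arr) s
      = pvPairs s (arr.getD i 0) (arr.drop (i + 1)) := by
  intro k
  induction k with
  | zero =>
      intro i s hlen
      rw [PySem.List.pyRange_one_eq_nil (by omega)]
      rw [List.drop_of_length_le (by omega)]
      rfl
  | succ k ih =>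
      intro i s hlen
      have hi1 : i + 1 < arr.length := by omega
      rw [PySem.List.pyRange_one_cons (by exact_mod_cast by omega)]
      rw [List.foldl_cons]
      rw [show ((i : Int) + 1 + 1) = (((i + 1 : Nat) : Int) + 1) by push_cast; ring]
      rw [ih (i + 1) (pvAStep arr s ((i : Int) + 1)) (by omega)]
      have hdrop : arr.drop (i + 1) = arr[i + 1] :: arr.drop (i + 2) :=
        List.drop_eq_getElem_cons hi1
      have hga : arr.getD (i + 1) 0 = arr[i + 1] := List.getD_eq_getElem arr 0 hi1
      have hg1 : PySem.List.pyGetD arr ((i : Int) + 1) 0 = arr[i + 1] := by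
        rw [show ((i : Int) + 1) = (((i + 1 : Nat)) : Int) by push_cast; ring,
          PySem.List.pyGetD_natCast]
        exact hga
      have hg0 : PySem.List.pyGetD arr ((i : Int) + 1 - 1) 0 = arr.getD i 0 := by
        rw [show ((i : Int) + 1 - 1) = ((i : Nat) : Int) by ring, PySem.List.pyGetD_natCast]
      have hstep : pvAStep arr s ((i : Int) + 1)
          = if arr[i + 1] - arr.getD i 0 > 0
            then (max s.1 (s.2 + (arr[i + 1] - arr.getD i 0)), s.2 + (arr[i + 1] - arr.getD i 0))
            else (s.1, 0) := by
        simp only [pvAStep, hg1, hg0]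
      rw [hdrop]
      simp only [pvPairs]
      rw [hstep, hga]

theorem pvFoldA_eq0 (x : Int) (rest : List Int) :
    ((PySem.List.pyRange 1 (((x :: rest).length : Nat) : Int) 1).foldl (pvAStep (x :: rest)) (0, 0))
      = pvPairs (0, 0) x rest := by
  have h := pvFoldA_eq (x :: rest) rest.length 0 (0, 0) (by simp [Nat.add_comm])
  simpa using h

-- phase-2 maximum over a list of runs
def pvM (runs : List (List Int)) : Int :=
  runs.foldl (fun best run => max best (pvRunVal run)) 0

theorem pvM_ge (runs : List (List Int)) : ∀ a : Int, a ≤ runs.foldl (fun best run => max best (pvRunVal run)) a := by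
  induction runs with
  | nil => intro a; exact le_refl a
  | cons r t ih =>
      intro a
      exact le_trans (le_max_left a (pvRunVal r)) (ih (max a (pvRunVal r)))

theorem pvM_nonneg (runs : List (List Int)) : 0 ≤ pvM runs := pvM_ge runs 0

theorem pvM_append (runs : List (List Int)) (r : List Int) :
    pvM (runs ++ [r]) = max (pvM runs) (pvRunVal r) := by
  simp [pvM, List.foldl_append]

-- the key invariant: B's phase-1 state vs A's pair recursion
theorem pvInvariant : ∀ (rest : List Int) (runs : List (List Int)) (cur : List Int) (h p : Int),
    cur.head? = some h → cur.getLast? = some p →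
    pvM (if (rest.foldl pvBStep (runs, cur)).2 ≠ [] then (rest.foldl pvBStep (runs, cur)).1 ++ [(rest.foldl pvBStep (runs, cur)).2] else (rest.foldl pvBStep (runs, cur)).1)
      = (pvPairs (pvM (runs ++ [cur]), p - h) p rest).1 := by
  intro rest
  induction rest with
  | nil =>
      intro runs cur h p hh hl
      have hne : cur ≠ [] := by intro e; subst e; simp at hh
      simp [pvPairs, hne]
  | cons x t ih =>
      intro runs cur h p hh hl
      have hne : cur ≠ [] := by intro e; subst e; simp at hh
      rw [List.foldl_cons]
      have hstep : pvBStep (runs, cur) x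
          = if x ≤ p then (runs ++ [cur], [x]) else (runs, cur ++ [x]) := by
        simp [pvBStep, hl]
      simp only [pvPairs]
      by_cases hle : x ≤ p
      · rw [hstep, if_pos hle]
        rw [if_neg (show ¬ x - p > 0 by omega)]
        rw [ih (runs ++ [cur]) [x] x x rfl rfl]
        have : pvM ((runs ++ [cur]) ++ [[x]]) = pvM (runs ++ [cur]) := by
          rw [pvM_append]
          have : pvRunVal [x] = 0 := by simp [pvRunVal]
          rw [this]
          exact max_eq_left (pvM_nonneg _)
        rw [this]
        norm_num
      · rw [hstep, if_neg hle]
        rw [if_pos (show x - p > 0 by omega)]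
        have hh' : (cur ++ [x]).head? = some h := by
          cases cur with
          | nil => exact absurd rfl hne
          | cons c cs => simpa using hh
        have hl' : (cur ++ [x]).getLast? = some x := by simp
        rw [ih runs (cur ++ [x]) h x hh' hl']
        have hval : pvRunVal cur = p - h := by
          simp [pvRunVal, List.getLastD_eq_getLast?, hh, hl]
        have hval' : pvRunVal (cur ++ [x]) = x - h := by
          simp [pvRunVal, List.getLastD_eq_getLast?, hh', hl']
        rw [pvM_append, pvM_append, hval, hval']
        have h2 : p - h + (x - p) = x - h := by ring
        rw [h2]
        have : max (max (pvM runs) (p - h)) (x - h) = max (pvM runs) (x - h) := by omega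
        rw [this]

-- ===== VERDICT (by name: the statement is the Claim_ definition above) =====
theorem largest_inclination_diff_spec : Claim_equal_largest_inclination_diff := by
  intro arr _
  unfold Spec_largest_inclination_diff largest_inclination_diff largest_inclination_diff_alt
  cases arr with
  | nil => rfl
  | cons x rest =>
      rw [pvFoldA_eq0 x rest]
      show _ = pvM _
      rw [List.foldl_cons]
      rw [show pvBStep ([], []) x = ([], [x]) from rfl]
      rw [pvInvariant rest [] [x] x x rfl rfl]
      have : pvM ([] ++ [[x]]) = 0 := by simp [pvM, pvRunVal]
      rw [this]
      norm_num
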